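-- pv_equiv track=rewrite | github.com/zml/zml | examples/triton_emitter/extract_xla_dump.py | _strip_inline_locs
-- ===== SOURCE A (Python) =====
-- def _strip_inline_locs(s: str) -> str:
--     """Remove every `loc(...)` call with balanced parens, skipping string literals."""
--     out, i, n = [], 0, len(s)
--     while i < n:
--         if s.startswith("loc(", i):
--             depth, j = 1, i + 4
--             while j < n and depth > 0:
--                 c = s[j]
--                 if c == "(": depth += 1
--                 elif c == ")": depth -= 1
--                 elif c == '"':
--                     j += 1
--                     while j < n and s[j] != '"':
--                         if s[j] == "\\": j += 1
--                         j += 1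
--                 j += 1
--             i = j
--         else:
--             out.append(s[i])
--             i += 1
--     return "".join(out)
-- ===== SOURCE B (Python) =====
-- def _strip_inline_locs(s: str) -> str:
--     """Remove every `loc(...)` call with balanced parens, skipping string literals."""
--     out = []
--     depth = 0          # 0 = normal text, >0 = inside a loc(...) region
--     in_string = False  # inside a "..." literal within a loc region
--     escape = False     # previous char inside the string was a backslash
--     i = 0
--     n = len(s)
--     while i < n:
--         c = s[i]
--         if depth == 0:
--             if s.startswith("loc(", i):
--                 depth = 1
--                 i += 4
--                 continue
--             out.append(c)
--         elif escape:
--             escape = False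
--         elif in_string:
--             if c == '"':
--                 in_string = False
--             elif c == '\\':
--                 escape = True
--         else:
--             if c == '(':
--                 depth += 1
--             elif c == ')':
--                 depth -= 1
--             elif c == '"':
--                 in_string = True
--         i += 1
--     return ''.join(out)
-- ===== Notes on version B (the rewrite author's own statement) =====
-- stated objective: alternative
-- what changed: A's nested while-loops (an inner balanced-paren scanner with its own inner string-literal scanner) are replaced by one flat single-pass state machine over characters maintaining a depth counter plus in_string and escape flags.
import Mathlib
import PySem

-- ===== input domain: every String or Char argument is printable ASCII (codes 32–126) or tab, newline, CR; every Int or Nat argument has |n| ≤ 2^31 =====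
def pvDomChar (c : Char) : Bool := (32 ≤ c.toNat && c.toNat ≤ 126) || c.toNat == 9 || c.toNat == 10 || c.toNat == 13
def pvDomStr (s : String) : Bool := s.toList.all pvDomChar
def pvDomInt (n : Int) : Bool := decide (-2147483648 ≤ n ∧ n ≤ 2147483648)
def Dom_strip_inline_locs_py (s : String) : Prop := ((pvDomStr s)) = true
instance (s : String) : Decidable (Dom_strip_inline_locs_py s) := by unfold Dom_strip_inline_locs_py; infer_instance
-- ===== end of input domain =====

-- B replaces A's nested skip-loops by one flat character-at-a-time state machine (depth / in-string / escape flags); objective: alternative decomposition, same O(n) cost.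


-- ===== PORT A =====
-- A's inner string scan: after the opening quote, skip chars (a backslash skips
-- the following char too) until the closing quote, which is consumed as well.
def skipStrA : List Char → List Char
  | [] => []
  | '"' :: rest => rest
  | '\\' :: _ :: rest => skipStrA rest
  | _ :: rest => skipStrA rest

theorem skipStrA_length_le : ∀ xs, (skipStrA xs).length ≤ xs.length := by
  intro xs
  induction xs using skipStrA.induct <;> simp [skipStrA] <;> omega

-- A's inner `while j < n and depth > 0` loop after `loc(`.
def skipLocA (depth : Nat) (xs : List Char) : List Char :=
  if depth = 0 then xs else
  match xs with
  | [] => []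
  | c :: rest =>
    if c = '(' then skipLocA (depth + 1) rest
    else if c = ')' then skipLocA (depth - 1) rest
    else if c = '"' then skipLocA depth (skipStrA rest)
    else skipLocA depth rest
termination_by xs.length
decreasing_by
  all_goals simp_all
  · exact skipStrA_length_le rest

theorem skipLocA_length_le : ∀ d xs, (skipLocA d xs).length ≤ xs.length := by
  intro d xs
  induction d, xs using skipLocA.induct with
  | case1 xs => rw [skipLocA.eq_def]; simp
  | case2 d h => rw [skipLocA.eq_def]; simp [h]
  | case3 d h rest ih => rw [skipLocA.eq_def]; simp [h]; omega
  | case4 d h rest hne ih => rw [skipLocA.eq_def]; simp [h]; omega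
  | case5 d h rest hne1 hne2 ih =>
      rw [skipLocA.eq_def]; simp [h]
      exact le_trans ih (le_trans (skipStrA_length_le rest) (Nat.le_succ _))
  | case6 d h c rest hc1 hc2 hc3 ih => rw [skipLocA.eq_def]; simp [h, hc1, hc2, hc3]; omega

-- A's outer loop: on `loc(` skip the balanced region, else emit the char.
def stripA : List Char → List Char
  | 'l' :: 'o' :: 'c' :: '(' :: rest => stripA (skipLocA 1 rest)
  | c :: rest => c :: stripA rest
  | [] => []
termination_by xs => xs.length
decreasing_by
  · have := skipLocA_length_le 1 rest; simp; omega
  · simp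

def strip_inline_locs_py (s : String) : String := String.mk (stripA s.toList)

-- ===== PORT B =====
-- s.startswith("loc(", i)
def startsLoc : List Char → Bool
  | 'l' :: 'o' :: 'c' :: '(' :: _ => true
  | _ => false

-- B's single while-loop: state = (depth, in_string, escape); branch order as in Source B.
def goB (xs : List Char) (depth : Nat) (inStr esc : Bool) : List Char :=
  match xs with
  | [] => []
  | c :: rest =>
    if depth = 0 then
      if startsLoc (c :: rest) then goB ((c :: rest).drop 4) 1 false false
      else c :: goB rest 0 inStr esc
    else if esc then goB rest depth inStr false
    else if inStr then
      if c = '"' then goB rest depth false esc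
      else if c = '\\' then goB rest depth inStr true
      else goB rest depth inStr esc
    else
      if c = '(' then goB rest (depth + 1) inStr esc
      else if c = ')' then goB rest (depth - 1) inStr esc
      else if c = '"' then goB rest depth true esc
      else goB rest depth inStr esc
termination_by xs.length
decreasing_by all_goals simp

def strip_inline_locs_py_alt (s : String) : String := String.mk (goB s.toList 0 false false)

-- ===== PRECONDITION & SPEC =====
def Spec_strip_inline_locs_py (s : String) (out : String) : Prop := out = strip_inline_locs_py_alt s
instance (s : String) (out : String) : Decidable (Spec_strip_inline_locs_py s out) := by unfold Spec_strip_inline_locs_py; infer_instance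

-- ===== CLAIM (what is proved, stated in full; the proofs are below) =====
def Claim_equal_strip_inline_locs_py : Prop := ∀ (s : String), Dom_strip_inline_locs_py s → Spec_strip_inline_locs_py s (strip_inline_locs_py s)

-- ===== LEMMAS AND PROOFS =====

-- In the in-string state, B consumes exactly what A's skipStrA consumes.
theorem goB_str : ∀ xs depth, depth ≠ 0 →
    goB xs depth true false = goB (skipStrA xs) depth false false := by
  intro xs
  induction xs using skipStrA.induct with
  | case1 => intro d h; simp [goB, skipStrA]
  | case2 rest => intro d h; simp [goB, skipStrA, h]
  | case3 head rest ih =>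
      intro d h
      simp only [skipStrA]
      rw [goB]; simp [h]
      rw [goB]; simp [h]
      exact ih d h
  | case4 c rest hq hb ih =>
      intro d h
      have hq' : c ≠ '"' := fun hc => hq hc
      by_cases hbs : c = '\\'
      · -- then rest = [], else the two-char backslash pattern would have matched
        cases rest with
        | nil => subst hbs; rw [goB]; simp [h, skipStrA, goB]
        | cons y ys => exact (hb y ys hbs rfl).elim
      · rw [goB]
        simp [h, hq', hbs]
        rw [show skipStrA (c :: rest) = skipStrA rest from by
          rw [skipStrA.eq_def]
          split <;> simp_all]
        exact ih d h

-- In the loc state (outside strings), B consumes exactly what skipLocA consumes.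
theorem goB_loc : ∀ depth xs, depth ≠ 0 →
    goB xs depth false false = goB (skipLocA depth xs) 0 false false := by
  intro depth xs
  induction depth, xs using skipLocA.induct with
  | case1 xs => intro h; exact absurd rfl h
  | case2 d h' => intro h; simp [goB, skipLocA, h]
  | case3 d h' rest ih =>
      intro h
      rw [goB]; simp [h]
      rw [skipLocA.eq_def]; simp [h]
      exact ih (by omega)
  | case4 d h' rest hne ih =>
      intro h
      rw [goB]; simp [h]
      rw [skipLocA.eq_def]; simp [h]
      by_cases hd : d - 1 = 0
      · rw [hd, skipLocA.eq_def]; simp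
      · exact ih hd
  | case5 d h' rest hne1 hne2 ih =>
      intro h
      rw [goB]; simp [h]
      rw [skipLocA.eq_def]; simp [h]
      rw [goB_str rest d h]
      exact ih h
  | case6 d h' c rest hc1 hc2 hc3 ih =>
      intro h
      rw [goB]; simp [h, hc1, hc2, hc3]
      rw [skipLocA.eq_def]; simp [h, hc1, hc2, hc3]
      exact ih h

theorem startsLoc_iff : ∀ xs, startsLoc xs = true ↔ ∃ t, xs = 'l' :: 'o' :: 'c' :: '(' :: t := by
  intro xs
  rw [startsLoc.eq_def]
  split <;> simp_all

theorem stripA_eq_goB : ∀ xs, stripA xs = goB xs 0 false false := by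
  intro xs
  induction xs using stripA.induct with
  | case1 rest ih =>
      rw [stripA, goB]
      simp [startsLoc]
      rw [goB_loc 1 rest (by omega)]
      exact ih
  | case2 c rest hne ih =>
      have hs : startsLoc (c :: rest) = false := by
        by_contra hcon
        obtain ⟨t, ht⟩ := (startsLoc_iff (c :: rest)).1 (by
          revert hcon; cases startsLoc (c :: rest) <;> simp)
        injection ht with h1 h2
        exact hne t h1 h2
      rw [goB]
      simp [hs]
      rw [stripA.eq_def]
      split
      · rename_i t heq
        injection heq with h1 h2
        exact (hne t h1 h2).elim
      · rename_i c' rest' heq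
        injection heq with h1 h2
        subst h1; subst h2
        simp [ih]
      · rename_i heq
        exact absurd heq (by simp)
  | case3 => rw [stripA, goB]

-- ===== VERDICT (by name: the statement is the Claim_ definition above) =====
theorem strip_inline_locs_py_spec : Claim_equal_strip_inline_locs_py := by
  intro s _
  unfold Spec_strip_inline_locs_py strip_inline_locs_py strip_inline_locs_py_alt
  rw [stripA_eq_goB]
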